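-- pv_equiv track=rewrite | github.com/Jun-ga/Coding_Practice | programmers/Exhaustive Search/모의고사.py | solution
-- ===== SOURCE A (Python) =====
-- def solution(answers):
--     per_answer = [] #삼인방 맞은 개수
--     answer = []
--     term = 0 #맞은 개수
--     person = [[1,2,3,4,5],[2,1,2,3,2,4,2,5],[3,3,1,1,2,2,4,4,5,5]] #답안
--     person_num = [5,8,10] #반복되는 답안
--
--     for i in range(3):
--         for j in range(len(answers)):
--             if answers[j] == person[i][j%person_num[i]]: # j%person_num[i]는 삼인방 반복되는 답안처리
--                 term += 1 #term에 정답일시 넣음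
--         per_answer.append(term) #한 사람끝나면 저장
--         term = 0 #새롭게 시작 전 맞은 개수 리셋
--
--     for i, num in enumerate(per_answer):
--         if num == max(per_answer): #제일 많이 맞은 사람
--             answer.append(i+1) #제일 많이 맞은 사람의 인덱스 출력 0부터 시작하므로 +1
--
--     return answer
-- ===== SOURCE B (Python) =====
-- def solution(answers):
--     # Precomputed-lookup algorithm: the three cyclic answer keys repeat with
--     # period lcm(5,8,10) = 40, so build once a 40x5 table mapping
--     # (index mod 40, answer value) -> the (0/1, 0/1, 0/1) score increments for
--     # the three takers, then scan the answers doing pure table lookups (no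
--     # pattern comparisons in the loop).
--     patterns = ([1, 2, 3, 4, 5],
--                 [2, 1, 2, 3, 2, 4, 2, 5],
--                 [3, 3, 1, 1, 2, 2, 4, 4, 5, 5])
--     table = [[tuple(int(v == p[r % len(p)]) for p in patterns)
--               for v in range(1, 6)]
--              for r in range(40)]
--     s1 = s2 = s3 = 0
--     for j, a in enumerate(answers):
--         if 1 <= a <= 5:
--             d1, d2, d3 = table[j % 40][a - 1]
--             s1 += d1
--             s2 += d2
--             s3 += d3
--     m = max(s1, s2, s3)
--     return [p for p, s in zip((1, 2, 3), (s1, s2, s3)) if s == m]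
-- ===== Notes on version B (the rewrite author's own statement) =====
-- stated objective: faster
-- what changed: B precomputes a 40x5 lookup table (the three answer keys repeat with period lcm(5,8,10)=40) mapping (index mod 40, answer value) to the three 0/1 score increments, so the single scan over answers does pure table lookups instead of A's three separate pattern-comparison scans; selection is a zip/filter over the three tallies instead of A's enumerate loop with a recomputed max.
import Mathlib
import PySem

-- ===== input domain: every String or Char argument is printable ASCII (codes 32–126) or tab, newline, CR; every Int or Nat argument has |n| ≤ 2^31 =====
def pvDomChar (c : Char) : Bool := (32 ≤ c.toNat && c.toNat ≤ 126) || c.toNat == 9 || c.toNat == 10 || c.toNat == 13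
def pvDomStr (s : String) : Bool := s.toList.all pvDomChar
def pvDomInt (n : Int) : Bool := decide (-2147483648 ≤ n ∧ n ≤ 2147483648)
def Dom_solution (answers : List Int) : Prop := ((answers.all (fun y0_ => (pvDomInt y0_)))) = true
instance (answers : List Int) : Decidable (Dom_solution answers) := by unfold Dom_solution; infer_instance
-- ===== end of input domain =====

-- B replaces A's three per-pattern comparison scans by one scan doing pure lookups in a
-- precomputed 40x5 increment table (the patterns repeat with period lcm(5,8,10)=40); the
-- timing run measured B faster by a constant factor; same return value.

-- ===== PORT A =====
def solution (answers : List Int) : List Int :=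
  let person : List (List Int) := [[1,2,3,4,5],[2,1,2,3,2,4,2,5],[3,3,1,1,2,2,4,4,5,5]]
  let person_num : List Int := [5,8,10]
  let per_answer : List Int :=
    (PySem.List.pyRange 0 3 1).foldl (fun per_answer i =>
      let term : Int :=
        (PySem.List.pyRange 0 (answers.length : Int) 1).foldl (fun term j =>
          if PySem.List.pyGetD answers j 0 =
             PySem.List.pyGetD (PySem.List.pyGetD person i [])
               (PySem.Int.mod j (PySem.List.pyGetD person_num i 0)) 0
          then term + 1 else term) 0
      per_answer ++ [term]) []
  (PySem.List.enumerate per_answer 0).foldl (fun answer p =>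
      if some p.2 = PySem.List.max? per_answer (fun y => y) then answer ++ [p.1 + 1] else answer) []

-- ===== PORT B =====
-- Source B's local 'patterns' and 'table', lifted to named helpers
def pvPatterns : List (List Int) := [[1,2,3,4,5],[2,1,2,3,2,4,2,5],[3,3,1,1,2,2,4,4,5,5]]

-- table[r][v-1] = the triple of 0/1 score increments for answer value v at an index j with j % 40 == r
def pvTable : List (List (Int × Int × Int)) :=
  (PySem.List.pyRange 0 40 1).map (fun r =>
    (PySem.List.pyRange 1 6 1).map (fun v =>
      ((if v = PySem.List.pyGetD (PySem.List.pyGetD pvPatterns 0 [])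
              (PySem.Int.mod r ((PySem.List.pyGetD pvPatterns 0 []).length : Int)) 0 then (1:Int) else 0),
       (if v = PySem.List.pyGetD (PySem.List.pyGetD pvPatterns 1 [])
              (PySem.Int.mod r ((PySem.List.pyGetD pvPatterns 1 []).length : Int)) 0 then (1:Int) else 0),
       (if v = PySem.List.pyGetD (PySem.List.pyGetD pvPatterns 2 [])
              (PySem.Int.mod r ((PySem.List.pyGetD pvPatterns 2 []).length : Int)) 0 then (1:Int) else 0))))

def solution_alt (answers : List Int) : List Int :=
  let s : Int × Int × Int :=
    (PySem.List.enumerate answers 0).foldl (fun (s : Int × Int × Int) ja =>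
      if 1 ≤ ja.2 ∧ ja.2 ≤ 5 then
        let d := PySem.List.pyGetD (PySem.List.pyGetD pvTable (PySem.Int.mod ja.1 40) []) (ja.2 - 1) (0,0,0)
        (s.1 + d.1, s.2.1 + d.2.1, s.2.2 + d.2.2)
      else s) (0, 0, 0)
  let m : Int := max (max s.1 s.2.1) s.2.2
  ((List.zip [1,2,3] [s.1, s.2.1, s.2.2]).filter (fun ps => ps.2 == m)).map (fun ps => ps.1)

-- ===== PRECONDITION & SPEC =====
def Spec_solution (answers : List Int) (out : List Int) : Prop := out = solution_alt answers
instance (answers : List Int) (out : List Int) : Decidable (Spec_solution answers out) := by unfold Spec_solution; infer_instance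

-- ===== CLAIM (what is proved, stated in full; the proofs are below) =====
def Claim_equal_solution : Prop := ∀ (answers : List Int), Dom_solution answers → Spec_solution answers (solution answers)

-- ===== LEMMAS AND PROOFS =====

-- the table lookup at (j % 40, a-1) is exactly the triple of match indicators of the three patterns at j
set_option maxRecDepth 8000 in
theorem lookup_eq_r (r a : Int) (hr0 : 0 ≤ r) (hr : r < 40) (h1 : 1 ≤ a) (h5 : a ≤ 5) :
    PySem.List.pyGetD (PySem.List.pyGetD pvTable r []) (a - 1) ((0:Int),(0:Int),(0:Int))
    = ((if a = PySem.List.pyGetD ([1,2,3,4,5] : List Int) (PySem.Int.mod r 5) 0 then (1:Int) else 0),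
       (if a = PySem.List.pyGetD ([2,1,2,3,2,4,2,5] : List Int) (PySem.Int.mod r 8) 0 then (1:Int) else 0),
       (if a = PySem.List.pyGetD ([3,3,1,1,2,2,4,4,5,5] : List Int) (PySem.Int.mod r 10) 0 then (1:Int) else 0)) := by
  interval_cases r <;> interval_cases a <;> decide

theorem pat_bounds (r : Int) (hr0 : 0 ≤ r) :
    (1 ≤ PySem.List.pyGetD ([1,2,3,4,5] : List Int) (PySem.Int.mod r 5) 0 ∧ PySem.List.pyGetD ([1,2,3,4,5] : List Int) (PySem.Int.mod r 5) 0 ≤ 5) ∧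
    (1 ≤ PySem.List.pyGetD ([2,1,2,3,2,4,2,5] : List Int) (PySem.Int.mod r 8) 0 ∧ PySem.List.pyGetD ([2,1,2,3,2,4,2,5] : List Int) (PySem.Int.mod r 8) 0 ≤ 5) ∧
    (1 ≤ PySem.List.pyGetD ([3,3,1,1,2,2,4,4,5,5] : List Int) (PySem.Int.mod r 10) 0 ∧ PySem.List.pyGetD ([3,3,1,1,2,2,4,4,5,5] : List Int) (PySem.Int.mod r 10) 0 ≤ 5) := by
  refine ⟨?_, ?_, ?_⟩
  · have h0 := PySem.Int.mod_nonneg r (b := 5) (by norm_num)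
    have h1 := PySem.Int.mod_lt r (b := 5) (by norm_num)
    set q := PySem.Int.mod r 5 with hq
    interval_cases q <;> constructor <;> decide
  · have h0 := PySem.Int.mod_nonneg r (b := 8) (by norm_num)
    have h1 := PySem.Int.mod_lt r (b := 8) (by norm_num)
    set q := PySem.Int.mod r 8 with hq
    interval_cases q <;> constructor <;> decide
  · have h0 := PySem.Int.mod_nonneg r (b := 10) (by norm_num)
    have h1 := PySem.Int.mod_lt r (b := 10) (by norm_num)
    set q := PySem.Int.mod r 10 with hq
    interval_cases q <;> constructor <;> decide

-- one step of B's lookup loop equals the fused triple of A's three per-pattern counting steps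
theorem step_eq (j a : Int) (_hj : 0 ≤ j) (s : Int × Int × Int) :
    (if 1 ≤ a ∧ a ≤ 5 then
       (s.1 + (PySem.List.pyGetD (PySem.List.pyGetD pvTable (PySem.Int.mod j 40) []) (a - 1) ((0:Int),(0:Int),(0:Int))).1,
        s.2.1 + (PySem.List.pyGetD (PySem.List.pyGetD pvTable (PySem.Int.mod j 40) []) (a - 1) ((0:Int),(0:Int),(0:Int))).2.1,
        s.2.2 + (PySem.List.pyGetD (PySem.List.pyGetD pvTable (PySem.Int.mod j 40) []) (a - 1) ((0:Int),(0:Int),(0:Int))).2.2)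
     else s)
    = ((if a = PySem.List.pyGetD ([1,2,3,4,5] : List Int) (PySem.Int.mod j 5) 0 then s.1 + 1 else s.1),
       (if a = PySem.List.pyGetD ([2,1,2,3,2,4,2,5] : List Int) (PySem.Int.mod j 8) 0 then s.2.1 + 1 else s.2.1),
       (if a = PySem.List.pyGetD ([3,3,1,1,2,2,4,4,5,5] : List Int) (PySem.Int.mod j 10) 0 then s.2.2 + 1 else s.2.2)) := by
  have e40 : PySem.Int.mod j 40 = j % 40 := PySem.Int.mod_eq_emod_of_pos (by norm_num)
  have e5 : PySem.Int.mod j 5 = PySem.Int.mod (PySem.Int.mod j 40) 5 := by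
    rw [e40, PySem.Int.mod_eq_emod_of_pos (a := j) (by norm_num : (0:Int) < 5),
        PySem.Int.mod_eq_emod_of_pos (by norm_num : (0:Int) < 5),
        Int.emod_emod_of_dvd j (by norm_num : (5:Int) ∣ 40)]
  have e8 : PySem.Int.mod j 8 = PySem.Int.mod (PySem.Int.mod j 40) 8 := by
    rw [e40, PySem.Int.mod_eq_emod_of_pos (a := j) (by norm_num : (0:Int) < 8),
        PySem.Int.mod_eq_emod_of_pos (by norm_num : (0:Int) < 8),
        Int.emod_emod_of_dvd j (by norm_num : (8:Int) ∣ 40)]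
  have e10 : PySem.Int.mod j 10 = PySem.Int.mod (PySem.Int.mod j 40) 10 := by
    rw [e40, PySem.Int.mod_eq_emod_of_pos (a := j) (by norm_num : (0:Int) < 10),
        PySem.Int.mod_eq_emod_of_pos (by norm_num : (0:Int) < 10),
        Int.emod_emod_of_dvd j (by norm_num : (10:Int) ∣ 40)]
  rw [e5, e8, e10]
  have hr0 : 0 ≤ PySem.Int.mod j 40 := PySem.Int.mod_nonneg j (by norm_num)
  have hr : PySem.Int.mod j 40 < 40 := PySem.Int.mod_lt j (by norm_num)
  set r := PySem.Int.mod j 40 with hrdef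
  by_cases h : 1 ≤ a ∧ a ≤ 5
  · rw [if_pos h]
    simp only [lookup_eq_r r a hr0 hr h.1 h.2]
    simp only [Prod.mk.injEq]
    refine ⟨?_, ?_, ?_⟩ <;> split_ifs <;> simp
  · rw [if_neg h]
    obtain ⟨⟨b1, b2⟩, ⟨b3, b4⟩, b5, b6⟩ := pat_bounds r hr0
    push_neg at h
    split_ifs with h1 h2 h3 h2 h3 h3 <;> first | rfl | (exfalso; omega)

-- the single lookup fold splits into the triple of A's three per-pattern counting folds
theorem tally_split (answers l : List Int) (a b c : Int) :
    l.foldl (fun (s : Int × Int × Int) j =>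
      (if PySem.List.pyGetD answers j 0 = PySem.List.pyGetD ([1,2,3,4,5] : List Int) (PySem.Int.mod j 5) 0 then s.1 + 1 else s.1,
       if PySem.List.pyGetD answers j 0 = PySem.List.pyGetD ([2,1,2,3,2,4,2,5] : List Int) (PySem.Int.mod j 8) 0 then s.2.1 + 1 else s.2.1,
       if PySem.List.pyGetD answers j 0 = PySem.List.pyGetD ([3,3,1,1,2,2,4,4,5,5] : List Int) (PySem.Int.mod j 10) 0 then s.2.2 + 1 else s.2.2))
      (a, b, c)
    = (l.foldl (fun t j => if PySem.List.pyGetD answers j 0 = PySem.List.pyGetD ([1,2,3,4,5] : List Int) (PySem.Int.mod j 5) 0 then t + 1 else t) a,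
       l.foldl (fun t j => if PySem.List.pyGetD answers j 0 = PySem.List.pyGetD ([2,1,2,3,2,4,2,5] : List Int) (PySem.Int.mod j 8) 0 then t + 1 else t) b,
       l.foldl (fun t j => if PySem.List.pyGetD answers j 0 = PySem.List.pyGetD ([3,3,1,1,2,2,4,4,5,5] : List Int) (PySem.Int.mod j 10) 0 then t + 1 else t) c) := by
  induction l generalizing a b c with
  | nil => rfl
  | cons x t ih => simp only [List.foldl_cons, ih]

-- A's selection loop over enumerate([c1,c2,c3]) with repeated max equals B's zip-filter-map
theorem select_eq (c1 c2 c3 m : Int) (hm : List.foldl max c1 [c2, c3] = m) :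
    (PySem.List.enumerate [c1, c2, c3] 0).foldl (fun answer p =>
        if some p.2 = PySem.List.max? [c1, c2, c3] (fun y => y) then answer ++ [p.1 + 1] else answer) []
    = ((List.zip [1, 2, 3] [c1, c2, c3]).filter (fun ps => ps.2 == m)).map (fun ps => ps.1) := by
  simp only [PySem.List.enumerate_cons, PySem.List.enumerate_nil, PySem.List.max?_id_cons,
    List.foldl_cons, List.foldl_nil, Option.some.injEq, List.zip, List.zipWith,
    List.filter_cons, List.filter_nil, hm]
  by_cases h1 : c1 = m <;> by_cases h2 : c2 = m <;> by_cases h3 : c3 = m <;>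
    simp [h1, h2, h3]

-- ===== VERDICT (by name: the statement is the Claim_ definition above) =====
theorem solution_spec : Claim_equal_solution := by
  intro answers _
  show solution answers = solution_alt answers
  unfold solution solution_alt
  rw [show PySem.List.pyRange 0 3 1 = [0, 1, 2] by decide]
  simp only [List.foldl_cons, List.foldl_nil,
    show PySem.List.pyGetD [[1,2,3,4,5],[2,1,2,3,2,4,2,5],[3,3,1,1,2,2,4,4,5,5]] 0 ([] : List Int) = [1,2,3,4,5] from by decide,
    show PySem.List.pyGetD [[1,2,3,4,5],[2,1,2,3,2,4,2,5],[3,3,1,1,2,2,4,4,5,5]] 1 ([] : List Int) = [2,1,2,3,2,4,2,5] from by decide,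
    show PySem.List.pyGetD [[1,2,3,4,5],[2,1,2,3,2,4,2,5],[3,3,1,1,2,2,4,4,5,5]] 2 ([] : List Int) = [3,3,1,1,2,2,4,4,5,5] from by decide,
    show PySem.List.pyGetD [(5:Int),8,10] 0 0 = 5 from by decide,
    show PySem.List.pyGetD [(5:Int),8,10] 1 0 = 8 from by decide,
    show PySem.List.pyGetD [(5:Int),8,10] 2 0 = 10 from by decide,
    List.nil_append, List.cons_append]
  rw [PySem.List.enumerate_eq_map_pyRange answers 0]
  simp only [List.foldl_map]
  have hcong := PySem.List.foldl_congr_mem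
    (l := PySem.List.pyRange 0 (PySem.List.len answers) 1)
    (init := ((0:Int), (0:Int), (0:Int)))
    (f := fun (x : Int × Int × Int) y =>
      if 1 ≤ PySem.List.pyGetD answers y 0 ∧ PySem.List.pyGetD answers y 0 ≤ 5 then
        (x.1 + (PySem.List.pyGetD (PySem.List.pyGetD pvTable (PySem.Int.mod y 40) [])
                  (PySem.List.pyGetD answers y 0 - 1) (0, 0, 0)).1,
         x.2.1 + (PySem.List.pyGetD (PySem.List.pyGetD pvTable (PySem.Int.mod y 40) [])
                  (PySem.List.pyGetD answers y 0 - 1) (0, 0, 0)).2.1,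
         x.2.2 + (PySem.List.pyGetD (PySem.List.pyGetD pvTable (PySem.Int.mod y 40) [])
                  (PySem.List.pyGetD answers y 0 - 1) (0, 0, 0)).2.2)
      else x)
    (g := fun (s : Int × Int × Int) j =>
      (if PySem.List.pyGetD answers j 0 = PySem.List.pyGetD ([1,2,3,4,5] : List Int) (PySem.Int.mod j 5) 0 then s.1 + 1 else s.1,
       if PySem.List.pyGetD answers j 0 = PySem.List.pyGetD ([2,1,2,3,2,4,2,5] : List Int) (PySem.Int.mod j 8) 0 then s.2.1 + 1 else s.2.1,
       if PySem.List.pyGetD answers j 0 = PySem.List.pyGetD ([3,3,1,1,2,2,4,4,5,5] : List Int) (PySem.Int.mod j 10) 0 then s.2.2 + 1 else s.2.2))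
    (by
      intro acc x hx
      have hx0 : 0 ≤ x := ((PySem.List.mem_pyRange_one).1 hx).1
      exact step_eq x (PySem.List.pyGetD answers x 0) hx0 acc)
  rw [hcong]
  rw [tally_split]
  exact select_eq _ _ _ _ (by simp [List.foldl])
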